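-- pv_equiv track=rewrite | github.com/Tanzeel0651/LLM_Unlearning | mixed_distill.py | create_interleaved_dataset
-- ===== SOURCE A (Python) =====
-- def create_interleaved_dataset(forget_dataset, retained_dataset):
--     mixed_dataset = []
--     retain_index = 0
--     forget_index = 0
--     forget_length = len(forget_dataset)
--     retain_length = len(retained_dataset)
--
--     while forget_index < forget_length and retain_index < retain_length:
--         for _ in range(1):
--             if forget_index < forget_length:
--                 mixed_dataset.append(forget_dataset[forget_index])
--                 forget_index += 1
--         if retain_index < retain_length:
--             mixed_dataset.append(retained_dataset[retain_index])
--             retain_index += 1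
--
--     while forget_index < forget_length:
--         mixed_dataset.append(forget_dataset[forget_index])
--         forget_index += 1
--
--     while retain_index < retain_length:
--         mixed_dataset.append(retained_dataset[retain_index])
--         retain_index += 1
--
--     return mixed_dataset
-- ===== SOURCE B (Python) =====
-- def create_interleaved_dataset(forget_dataset, retained_dataset):
--     # Closed-form construction: element at output position i is determined by
--     # index arithmetic alone -- alternating halves in the zipped region, then
--     # the tail of the longer dataset.
--     n = len(forget_dataset)
--     m = len(retained_dataset)
--     k = min(n, m)
--
--     def pick(i):
--         if i < 2 * k:
--             return forget_dataset[i // 2] if i % 2 == 0 else retained_dataset[i // 2]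
--         j = k + (i - 2 * k)
--         return forget_dataset[j] if n > m else retained_dataset[j]
--
--     return [pick(i) for i in range(n + m)]
-- ===== Notes on version B (the rewrite author's own statement) =====
-- stated objective: alternative
-- what changed: Replaced A's three cursor-advancing while-loops with a direct construction of the output by position: each output index i is mapped by closed-form index arithmetic (i//2 with parity selecting the source in the alternating region, then the tail of the longer list), so no interleaving cursors or staged loops remain.
import Mathlib
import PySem

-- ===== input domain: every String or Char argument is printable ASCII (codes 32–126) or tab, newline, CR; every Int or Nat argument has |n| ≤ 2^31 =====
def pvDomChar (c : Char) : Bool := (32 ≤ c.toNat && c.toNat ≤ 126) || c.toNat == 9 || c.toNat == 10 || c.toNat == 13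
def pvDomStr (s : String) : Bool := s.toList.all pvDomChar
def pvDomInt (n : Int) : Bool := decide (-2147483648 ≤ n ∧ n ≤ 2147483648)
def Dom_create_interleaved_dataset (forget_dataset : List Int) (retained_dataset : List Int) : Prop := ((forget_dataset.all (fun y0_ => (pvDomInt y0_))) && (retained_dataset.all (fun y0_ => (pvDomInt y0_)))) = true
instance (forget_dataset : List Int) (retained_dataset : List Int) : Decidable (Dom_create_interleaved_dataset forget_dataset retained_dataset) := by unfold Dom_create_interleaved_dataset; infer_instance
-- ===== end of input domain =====

-- B builds the output by position with closed-form index arithmetic instead of A's three cursor-driven while-loops (objective: alternative).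

-- ===== PORT A =====
-- First while loop of A. Inside its body the Python guards 'if forget_index < forget_length'
-- and 'if retain_index < retain_length' are both implied by the while condition (and the inner
-- 'for _ in range(1)' runs its body exactly once), so the body always appends f[fi], r[ri] and
-- increments both indices; transliterated accordingly. Indices are in range, so plain getD.
def pvWhileBoth (f r : List Int) (fi ri : Nat) (acc : List Int) : Nat × Nat × List Int :=
  if fi < f.length ∧ ri < r.length then
    pvWhileBoth f r (fi + 1) (ri + 1) ((acc ++ [f.getD fi 0]) ++ [r.getD ri 0])
  else (fi, ri, acc)
termination_by f.length - fi
decreasing_by omega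

-- second while loop of A
def pvWhileF (f : List Int) (fi : Nat) (acc : List Int) : List Int :=
  if fi < f.length then pvWhileF f (fi + 1) (acc ++ [f.getD fi 0]) else acc
termination_by f.length - fi
decreasing_by omega

-- third while loop of A
def pvWhileR (r : List Int) (ri : Nat) (acc : List Int) : List Int :=
  if ri < r.length then pvWhileR r (ri + 1) (acc ++ [r.getD ri 0]) else acc
termination_by r.length - ri
decreasing_by omega

def create_interleaved_dataset (forget_dataset : List Int) (retained_dataset : List Int) : List Int :=
  let s := pvWhileBoth forget_dataset retained_dataset 0 0 []
  pvWhileR retained_dataset s.2.1 (pvWhileF forget_dataset s.1 s.2.2)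

-- ===== PORT B =====
-- Source B's pick(i): all indices used are nonnegative and in range, so Nat i//2 and getD are exact.
def pvPick (f r : List Int) (i : Nat) : Int :=
  let n := f.length
  let m := r.length
  let k := min n m
  if i < 2 * k then
    if i % 2 == 0 then f.getD (i / 2) 0 else r.getD (i / 2) 0
  else
    let j := k + (i - 2 * k)
    if n > m then f.getD j 0 else r.getD j 0

def create_interleaved_dataset_alt (forget_dataset : List Int) (retained_dataset : List Int) : List Int :=
  (List.range (forget_dataset.length + retained_dataset.length)).map
    (pvPick forget_dataset retained_dataset)

-- ===== PRECONDITION & SPEC =====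
def Spec_create_interleaved_dataset (forget_dataset : List Int) (retained_dataset : List Int) (out : List Int) : Prop := out = create_interleaved_dataset_alt forget_dataset retained_dataset
instance (forget_dataset : List Int) (retained_dataset : List Int) (out : List Int) : Decidable (Spec_create_interleaved_dataset forget_dataset retained_dataset out) := by unfold Spec_create_interleaved_dataset; infer_instance

-- ===== CLAIM (what is proved, stated in full; the proofs are below) =====
def Claim_equal_create_interleaved_dataset : Prop := ∀ (forget_dataset : List Int) (retained_dataset : List Int), Dom_create_interleaved_dataset forget_dataset retained_dataset → Spec_create_interleaved_dataset forget_dataset retained_dataset (create_interleaved_dataset forget_dataset retained_dataset)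

-- ===== LEMMAS AND PROOFS =====

-- proof-only intermediate characterisation: pairwise interleave, then remainder
def pvInter : List Int → List Int → List Int
  | [], r => r
  | f, [] => f
  | a :: f, b :: r => a :: b :: pvInter f r

theorem inter_nil_left (r : List Int) : pvInter [] r = r := by cases r <;> rfl

theorem inter_nil_right (f : List Int) : pvInter f [] = f := by cases f <;> rfl

theorem drop_eq_cons (l : List Int) (i : Nat) (h : i < l.length) :
    l.drop i = l.getD i 0 :: l.drop (i + 1) := by
  rw [List.drop_eq_getElem_cons h, List.getD_eq_getElem l 0 h]

theorem pvWhileF_spec (f : List Int) : ∀ fi acc, pvWhileF f fi acc = acc ++ f.drop fi := by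
  intro fi
  induction hn : f.length - fi using Nat.strong_induction_on generalizing fi with
  | _ n ih =>
    intro acc
    rw [pvWhileF]
    split
    · next h =>
      rw [ih (f.length - (fi + 1)) (by omega) (fi + 1) rfl, drop_eq_cons f fi h]
      simp
    · next h =>
      rw [List.drop_eq_nil_of_le (by omega), List.append_nil]

theorem pvWhileR_spec (r : List Int) : ∀ ri acc, pvWhileR r ri acc = acc ++ r.drop ri := by
  intro ri
  induction hn : r.length - ri using Nat.strong_induction_on generalizing ri with
  | _ n ih =>
    intro acc
    rw [pvWhileR]
    split
    · next h =>
      rw [ih (r.length - (ri + 1)) (by omega) (ri + 1) rfl, drop_eq_cons r ri h]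
      simp
    · next h =>
      rw [List.drop_eq_nil_of_le (by omega), List.append_nil]

theorem pvWhileBoth_spec (f r : List Int) : ∀ fi ri acc,
    pvWhileR r (pvWhileBoth f r fi ri acc).2.1
      (pvWhileF f (pvWhileBoth f r fi ri acc).1 (pvWhileBoth f r fi ri acc).2.2)
      = acc ++ pvInter (f.drop fi) (r.drop ri) := by
  intro fi
  induction hn : f.length - fi using Nat.strong_induction_on generalizing fi with
  | _ n ih =>
    intro ri acc
    rw [pvWhileBoth]
    split
    · next h =>
      rw [ih (f.length - (fi + 1)) (by omega) (fi + 1) rfl ri.succ]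
      rw [drop_eq_cons f fi h.1, drop_eq_cons r ri h.2, pvInter]
      simp
    · next h =>
      rw [pvWhileF_spec, pvWhileR_spec]
      rcases Nat.lt_or_ge fi f.length with hf | hf
      · have hr : r.length ≤ ri := by omega
        rw [List.drop_eq_nil_of_le hr, inter_nil_right]
        simp
      · rw [List.drop_eq_nil_of_le hf, inter_nil_left]
        simp

theorem a_eq_inter (f r : List Int) : create_interleaved_dataset f r = pvInter f r := by
  unfold create_interleaved_dataset
  simpa using pvWhileBoth_spec f r 0 0 []

-- pick shifts by two when both lists grow by one element in front
theorem pick_shift (a b : Int) (f r : List Int) (i : Nat) :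
    pvPick (a :: f) (b :: r) (i + 2) = pvPick f r i := by
  simp only [pvPick, List.length_cons]
  have hk : min (f.length + 1) (r.length + 1) = min f.length r.length + 1 := by omega
  rw [hk]
  by_cases hlt : i < 2 * min f.length r.length
  · have h2 : i + 2 < 2 * (min f.length r.length + 1) := by omega
    have hdiv : (i + 2) / 2 = i / 2 + 1 := by omega
    have hmod : (i + 2) % 2 = i % 2 := by omega
    rw [if_pos h2, if_pos hlt, hdiv, hmod]
    by_cases he : i % 2 == 0 <;> simp [he]
  · have h2 : ¬ (i + 2 < 2 * (min f.length r.length + 1)) := by omega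
    rw [if_neg h2, if_neg hlt]
    have hj : min f.length r.length + 1 + (i + 2 - 2 * (min f.length r.length + 1))
        = (min f.length r.length + (i - 2 * min f.length r.length)) + 1 := by omega
    have hgt : (f.length + 1 > r.length + 1) ↔ (f.length > r.length) := by omega
    rw [hj]
    by_cases hg : f.length > r.length
    · rw [if_pos (hgt.mpr hg), if_pos hg, List.getD_cons_succ]
    · rw [if_neg (fun h => hg (hgt.mp h)), if_neg hg, List.getD_cons_succ]

theorem alt_nil_left (r : List Int) : create_interleaved_dataset_alt [] r = r := by
  unfold create_interleaved_dataset_alt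
  apply List.ext_getElem
  · simp
  · intro i h1 h2
    have h2' : i < r.length := by simpa using h2
    simp [pvPick, List.getElem?_eq_getElem h2']

theorem alt_nil_right (f : List Int) : create_interleaved_dataset_alt f [] = f := by
  unfold create_interleaved_dataset_alt
  apply List.ext_getElem
  · simp
  · intro i h1 h2
    have h2' : i < f.length := by simpa using h2
    rcases Nat.eq_zero_or_pos f.length with h0 | h0
    · omega
    · simp [pvPick, List.getElem?_eq_getElem h2', h0]

theorem alt_cons_cons (a b : Int) (f r : List Int) :
    create_interleaved_dataset_alt (a :: f) (b :: r)
      = a :: b :: create_interleaved_dataset_alt f r := by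
  unfold create_interleaved_dataset_alt
  have hlen : (a :: f).length + (b :: r).length = f.length + r.length + 1 + 1 := by
    simp; omega
  rw [hlen, List.range_succ_eq_map, List.range_succ_eq_map]
  simp only [List.map_cons, List.map_map]
  have h0 : pvPick (a :: f) (b :: r) 0 = a := by
    simp [pvPick]
  have h1 : pvPick (a :: f) (b :: r) 1 = b := by
    have hc : 1 < 2 * (min (f.length + 1) (r.length + 1)) := by omega
    simp only [pvPick, List.length_cons]
    rw [if_pos hc]
    simp
  rw [h0, h1]
  congr 1
  congr 1
  apply List.map_congr_left
  intro i _
  show pvPick (a :: f) (b :: r) (i + 1 + 1) = pvPick f r i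
  exact pick_shift a b f r i

theorem b_eq_inter (f : List Int) : ∀ r, create_interleaved_dataset_alt f r = pvInter f r := by
  induction f with
  | nil => intro r; rw [alt_nil_left, inter_nil_left]
  | cons a f ih =>
    intro r
    cases r with
    | nil => rw [alt_nil_right, inter_nil_right]
    | cons b r => rw [alt_cons_cons, pvInter, ih]

-- ===== VERDICT (by name: the statement is the Claim_ definition above) =====
theorem create_interleaved_dataset_spec : Claim_equal_create_interleaved_dataset := by
  intro f r _
  unfold Spec_create_interleaved_dataset
  rw [a_eq_inter, b_eq_inter]
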